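-- pv_equiv track=rewrite | github.com/Mitul9703/mealplanner | Test knapsack.py | knapsack_recipes
-- ===== SOURCE A (Python) =====
-- def knapsack_recipes(recipes, max_calories, max_protein, max_fats, max_carbohydrates, dietary_preference, max_preparation_time, max_portion_size):
--     num_recipes = len(recipes)
--
--     # Initialize the dynamic programming table
--     dp = [[0] * (max_portion_size + 1) for _ in range(max_preparation_time + 1)]
--
--     # Initialize a matrix to store the selected recipes
--     selected_recipes = [[[] for _ in range(max_portion_size + 1)] for _ in range(max_preparation_time + 1)]
--
--     # Iterate over each recipe
--     for i in range(num_recipes):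
--         recipe = recipes[i]
--         calories, protein, fats, carbohydrates, dietary_pref, preparation_time, portion_size, name = recipe
--
--         # Check if the recipe satisfies the dietary preference
--         if dietary_pref != dietary_preference:
--             continue
--
--         # Iterate over each preparation time and portion size
--         for t in range(max_preparation_time, preparation_time - 1, -1):
--             for s in range(max_portion_size, portion_size - 1, -1):
--                 # Check if the recipe can be included in the knapsack
--                 if (
--                     calories <= max_calories
--                     and protein <= max_protein
--                     and fats <= max_fats
--                     and carbohydrates <= max_carbohydrates
--                 ):
--                     # Check if including the recipe improves the current value
--                     if dp[t][s] < dp[t - preparation_time][s - portion_size] + calories: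
--                         dp[t][s] = dp[t - preparation_time][s - portion_size] + calories
--                         selected_recipes[t][s] = selected_recipes[t - preparation_time][s - portion_size] + [name]
--
--     # Retrieve the selected recipes
--     selected = selected_recipes[max_preparation_time][max_portion_size]
--
--     return selected
-- ===== SOURCE B (Python) =====
-- def knapsack_recipes(recipes, max_calories, max_protein, max_fats, max_carbohydrates, dietary_preference, max_preparation_time, max_portion_size):
--     # Top-down memoized recursion over (number of recipes considered, remaining time, remaining portions).
--     memo = {}
--
--     def best(i, t, s):
--         # best (value, names in selection order) using only recipes[:i] within budgets (t, s)
--         if i == 0: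
--             return (0, [])
--         key = (i, t, s)
--         if key in memo:
--             return memo[key]
--         calories, protein, fats, carbohydrates, dietary_pref, preparation_time, portion_size, name = recipes[i - 1]
--         res = best(i - 1, t, s)
--         if (dietary_pref == dietary_preference
--                 and calories <= max_calories
--                 and protein <= max_protein
--                 and fats <= max_fats
--                 and carbohydrates <= max_carbohydrates
--                 and preparation_time <= t
--                 and portion_size <= s):
--             v, chosen = best(i - 1, t - preparation_time, s - portion_size)
--             if res[0] < v + calories:
--                 res = (v + calories, chosen + [name])
--         memo[key] = res
--         return res
--
--     return best(len(recipes), max_preparation_time, max_portion_size)[1]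
-- ===== Notes on version B (the rewrite author's own statement) =====
-- stated objective: alternative
-- what changed: Replaces A's bottom-up in-place 2D table (nested reverse loops mutating dp/selected_recipes) by a top-down memoized recursion best(i,t,s) over (recipes considered, remaining time, remaining portions) that reconstructs the same value/selection pair directly.
-- outside the precondition, e.g. on knapsack_recipes([(10, 0, 0, 0, 'v', -1, 5, 'n')], 100, 100, 100, 100, 'v', 3, 2): A returns [], B returns []
import Mathlib
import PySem

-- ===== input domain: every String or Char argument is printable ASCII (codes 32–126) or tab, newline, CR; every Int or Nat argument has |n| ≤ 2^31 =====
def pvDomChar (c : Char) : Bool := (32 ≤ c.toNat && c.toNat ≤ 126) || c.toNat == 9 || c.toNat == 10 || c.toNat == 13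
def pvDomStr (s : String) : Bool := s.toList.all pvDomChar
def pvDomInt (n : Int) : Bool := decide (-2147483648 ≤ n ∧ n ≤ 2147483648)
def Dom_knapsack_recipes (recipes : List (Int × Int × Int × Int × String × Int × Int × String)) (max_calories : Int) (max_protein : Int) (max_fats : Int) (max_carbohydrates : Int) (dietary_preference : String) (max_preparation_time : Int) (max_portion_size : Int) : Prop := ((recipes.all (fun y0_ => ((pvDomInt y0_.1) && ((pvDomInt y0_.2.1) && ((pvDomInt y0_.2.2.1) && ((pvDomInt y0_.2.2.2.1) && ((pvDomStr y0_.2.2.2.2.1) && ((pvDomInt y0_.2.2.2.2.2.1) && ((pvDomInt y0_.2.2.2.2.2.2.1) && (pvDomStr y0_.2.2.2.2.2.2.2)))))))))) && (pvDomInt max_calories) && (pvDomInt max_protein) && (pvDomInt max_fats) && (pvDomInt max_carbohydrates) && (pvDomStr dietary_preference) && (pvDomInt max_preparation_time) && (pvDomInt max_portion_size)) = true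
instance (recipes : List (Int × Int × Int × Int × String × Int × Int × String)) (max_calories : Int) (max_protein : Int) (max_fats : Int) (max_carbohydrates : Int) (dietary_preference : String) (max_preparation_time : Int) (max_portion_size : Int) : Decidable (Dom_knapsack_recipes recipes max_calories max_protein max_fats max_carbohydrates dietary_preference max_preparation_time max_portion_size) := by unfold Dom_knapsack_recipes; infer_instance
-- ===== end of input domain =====

-- B replaces A's bottom-up in-place 2D DP table by a top-down recursion over
-- (recipes considered, remaining time, remaining portions); same return value (alternative decomposition).


-- ===== PORT A =====
-- 2D-table helpers: m[t][s] read / write, Python index semantics via pyGetD/pySetD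
-- (the IndexError cases of Python's m[t][s] are excluded by Pre_knapsack_recipes; pyGetD/pySetD are its total forms).
def pvGetT {α : Type} (d : α) (m : List (List α)) (t s : Int) : α :=
  PySem.List.pyGetD (PySem.List.pyGetD m t []) s d

def pvSetT {α : Type} (m : List (List α)) (t s : Int) (v : α) : List (List α) :=
  PySem.List.pySetD m t (PySem.List.pySetD (PySem.List.pyGetD m t []) s v)

-- the body of A's outer 'for i in range(num_recipes)' loop, acting on the state (dp, selected_recipes)
def pvStepA (mc mp mf mb : Int) (pref : String) (T S : Int)
    (st : List (List Int) × List (List (List String)))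
    (r : Int × Int × Int × Int × String × Int × Int × String) :
    List (List Int) × List (List (List String)) :=
  match r with
  | (cal, prot, fats, carbs, dpref, pt, ps, name) =>
    if dpref ≠ pref then st
    else
      (PySem.List.pyRange T (pt - 1) (-1)).foldl (fun st1 t =>
        (PySem.List.pyRange S (ps - 1) (-1)).foldl (fun st2 s =>
          if cal ≤ mc ∧ prot ≤ mp ∧ fats ≤ mf ∧ carbs ≤ mb then
            if pvGetT 0 st2.1 t s < pvGetT 0 st2.1 (t - pt) (s - ps) + cal then
              (pvSetT st2.1 t s (pvGetT 0 st2.1 (t - pt) (s - ps) + cal),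
               pvSetT st2.2 t s (pvGetT [] st2.2 (t - pt) (s - ps) ++ [name]))
            else st2
          else st2) st1) st

-- 'for i in range(num_recipes): recipe = recipes[i]; …' visits exactly the elements of recipes in order:
-- transliterated as a foldl over recipes.
def knapsack_recipes (recipes : List (Int × Int × Int × Int × String × Int × Int × String)) (max_calories : Int) (max_protein : Int) (max_fats : Int) (max_carbohydrates : Int) (dietary_preference : String) (max_preparation_time : Int) (max_portion_size : Int) : List String :=
  let dp0 : List (List Int) :=
    (PySem.List.pyRange 0 (max_preparation_time + 1) 1).map
      (fun _ => List.replicate (max_portion_size + 1).toNat (0 : Int))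
  let sel0 : List (List (List String)) :=
    (PySem.List.pyRange 0 (max_preparation_time + 1) 1).map
      (fun _ => List.replicate (max_portion_size + 1).toNat ([] : List String))
  let fin := recipes.foldl
    (pvStepA max_calories max_protein max_fats max_carbohydrates dietary_preference max_preparation_time max_portion_size)
    (dp0, sel0)
  pvGetT [] fin.2 max_preparation_time max_portion_size

-- ===== PORT B =====
-- Source B's best(i, t, s): best (value, names) using recipes[:i] within budgets (t, s).
-- (Source B memoizes this recursion; the memo table is a pure cache, the computed values are these.)
def pvBest (rs : List (Int × Int × Int × Int × String × Int × Int × String))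
    (mc mp mf mb : Int) (pref : String) :
    Nat → Int → Int → Int × List String
  | 0, _, _ => (0, [])
  | i + 1, t, s =>
    match PySem.List.pyGet? rs (i : Int) with
    | none => (0, [])  -- unreachable: every call keeps i below rs.length
    | some (cal, prot, fats, carbs, dpref, pt, ps, name) =>
      let res := pvBest rs mc mp mf mb pref i t s
      if dpref = pref ∧ cal ≤ mc ∧ prot ≤ mp ∧ fats ≤ mf ∧ carbs ≤ mb ∧ pt ≤ t ∧ ps ≤ s then
        let inc := pvBest rs mc mp mf mb pref i (t - pt) (s - ps)
        if res.1 < inc.1 + cal then (inc.1 + cal, inc.2 ++ [name]) else res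
      else res

def knapsack_recipes_alt (recipes : List (Int × Int × Int × Int × String × Int × Int × String)) (max_calories : Int) (max_protein : Int) (max_fats : Int) (max_carbohydrates : Int) (dietary_preference : String) (max_preparation_time : Int) (max_portion_size : Int) : List String :=
  (pvBest recipes max_calories max_protein max_fats max_carbohydrates dietary_preference
    recipes.length max_preparation_time max_portion_size).2

-- ===== PRECONDITION & SPEC =====
-- Pre_ excludes inputs where A raises IndexError (negative budgets; a preference-matching,
-- nutrient-admissible recipe with negative preparation_time or portion_size makes A read past the
-- table on all but empty-loop corners, on which A's accepting-by-accident is excluded too).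
def Pre_knapsack_recipes (recipes : List (Int × Int × Int × Int × String × Int × Int × String)) (max_calories : Int) (max_protein : Int) (max_fats : Int) (max_carbohydrates : Int) (dietary_preference : String) (max_preparation_time : Int) (max_portion_size : Int) : Prop :=
  0 ≤ max_preparation_time ∧ 0 ≤ max_portion_size ∧
  ∀ r ∈ recipes,
    (r.2.2.2.2.1 = dietary_preference ∧ r.1 ≤ max_calories ∧ r.2.1 ≤ max_protein ∧
     r.2.2.1 ≤ max_fats ∧ r.2.2.2.1 ≤ max_carbohydrates) →
    0 ≤ r.2.2.2.2.2.1 ∧ 0 ≤ r.2.2.2.2.2.2.1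

instance (recipes : List (Int × Int × Int × Int × String × Int × Int × String)) (max_calories : Int) (max_protein : Int) (max_fats : Int) (max_carbohydrates : Int) (dietary_preference : String) (max_preparation_time : Int) (max_portion_size : Int) : Decidable (Pre_knapsack_recipes recipes max_calories max_protein max_fats max_carbohydrates dietary_preference max_preparation_time max_portion_size) := by unfold Pre_knapsack_recipes; infer_instance

def pvWitness_knapsack_recipes : (List (Int × Int × Int × Int × String × Int × Int × String)) × Int × Int × Int × Int × String × Int × Int :=
  ([(100, 5, 2, 10, "v", 2, 1, "a"), (200, 5, 2, 10, "v", 2, 2, "b")], 500, 50, 50, 50, "v", 4, 3)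

def Spec_knapsack_recipes (recipes : List (Int × Int × Int × Int × String × Int × Int × String)) (max_calories : Int) (max_protein : Int) (max_fats : Int) (max_carbohydrates : Int) (dietary_preference : String) (max_preparation_time : Int) (max_portion_size : Int) (out : List String) : Prop := out = knapsack_recipes_alt recipes max_calories max_protein max_fats max_carbohydrates dietary_preference max_preparation_time max_portion_size
instance (recipes : List (Int × Int × Int × Int × String × Int × Int × String)) (max_calories : Int) (max_protein : Int) (max_fats : Int) (max_carbohydrates : Int) (dietary_preference : String) (max_preparation_time : Int) (max_portion_size : Int) (out : List String) : Decidable (Spec_knapsack_recipes recipes max_calories max_protein max_fats max_carbohydrates dietary_preference max_preparation_time max_portion_size out) := by unfold Spec_knapsack_recipes; infer_instance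

-- ===== CLAIM (what is proved, stated in full; the proofs are below) =====
def Claim_equal_knapsack_recipes : Prop := ∀ (recipes : List (Int × Int × Int × Int × String × Int × Int × String)) (max_calories : Int) (max_protein : Int) (max_fats : Int) (max_carbohydrates : Int) (dietary_preference : String) (max_preparation_time : Int) (max_portion_size : Int), Dom_knapsack_recipes recipes max_calories max_protein max_fats max_carbohydrates dietary_preference max_preparation_time max_portion_size → Pre_knapsack_recipes recipes max_calories max_protein max_fats max_carbohydrates dietary_preference max_preparation_time max_portion_size → Spec_knapsack_recipes recipes max_calories max_protein max_fats max_carbohydrates dietary_preference max_preparation_time max_portion_size (knapsack_recipes recipes max_calories max_protein max_fats max_carbohydrates dietary_preference max_preparation_time max_portion_size)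

-- ===== LEMMAS AND PROOFS =====

def Shape2 {α : Type} (m : List (List α)) (T S : Int) : Prop :=
  m.length = (T + 1).toNat ∧ ∀ row ∈ m, row.length = (S + 1).toNat

def pvCell (cal pt ps : Int) (name : String)
    (dp0 : List (List Int)) (sel0 : List (List (List String))) (t s : Int) : Int × List String :=
  if pvGetT 0 dp0 t s < pvGetT 0 dp0 (t - pt) (s - ps) + cal then
    (pvGetT 0 dp0 (t - pt) (s - ps) + cal, pvGetT [] sel0 (t - pt) (s - ps) ++ [name])
  else (pvGetT 0 dp0 t s, pvGetT [] sel0 t s)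

theorem pvShape2_set {α : Type} {m : List (List α)} {T S t s : Int} (v : α) (h : Shape2 m T S)
    (ht0 : 0 ≤ t) (htT : t ≤ T) (hs0 : 0 ≤ s) : Shape2 (pvSetT m t s v) T S := by
  obtain ⟨hlen, hrow⟩ := h
  have htlt : (t.toNat) < m.length := by omega
  unfold pvSetT
  rw [PySem.List.pySetD_of_nonneg _ _ ht0, PySem.List.pySetD_of_nonneg _ _ hs0,
      PySem.List.pyGetD_eq_getElem _ _ ht0 (by omega)]
  refine ⟨by simpa using hlen, ?_⟩
  intro row hr
  rcases List.mem_or_eq_of_mem_set hr with h1 | h2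
  · exact hrow _ h1
  · subst h2; rw [List.length_set]; exact hrow _ (List.getElem_mem htlt)

theorem pvGetT_setT {α : Type} (d : α) {m : List (List α)} {T S t s t' s' : Int}
    (h : Shape2 m T S) (ht0 : 0 ≤ t) (htT : t ≤ T) (hs0 : 0 ≤ s) (hsS : s ≤ S)
    (ht0' : 0 ≤ t') (htT' : t' ≤ T) (hs0' : 0 ≤ s') (hsS' : s' ≤ S) (v : α) :
    pvGetT d (pvSetT m t s v) t' s' = if t' = t ∧ s' = s then v else pvGetT d m t' s' := by
  obtain ⟨hlen, hrow⟩ := h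
  have htlt : (t.toNat) < m.length := by omega
  have htlt' : (t'.toNat) < m.length := by omega
  have hrowlen : (m[t.toNat]).length = (S + 1).toNat := hrow _ (List.getElem_mem htlt)
  have hrowlen' : (m[t'.toNat]).length = (S + 1).toNat := hrow _ (List.getElem_mem htlt')
  unfold pvGetT pvSetT
  rw [PySem.List.pySetD_of_nonneg _ _ ht0, PySem.List.pySetD_of_nonneg _ _ hs0,
      PySem.List.pyGetD_eq_getElem _ _ ht0 (by omega)]
  rw [PySem.List.pyGetD_eq_getElem _ _ ht0' (by simp [List.length_set]; omega)]
  rw [List.getElem_set]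
  by_cases hteq : t.toNat = t'.toNat
  · have ht'eq : t' = t := by omega
    subst ht'eq
    rw [if_pos rfl]
    rw [PySem.List.pyGetD_eq_getElem _ _ hs0' (by rw [List.length_set]; omega)]
    rw [List.getElem_set]
    by_cases hseq : s.toNat = s'.toNat
    · have hs'eq : s' = s := by omega
      simp [hseq, hs'eq]
    · have hs'ne : ¬ (s' = s) := by omega
      rw [if_neg hseq]
      rw [PySem.List.pyGetD_eq_getElem _ _ ht0 (by omega),
          PySem.List.pyGetD_eq_getElem _ _ hs0' (by omega)]
      simp [hs'ne]
  · have htne : ¬ (t' = t) := by omega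
    simp only [if_neg hteq, if_neg (by simp [htne] : ¬ (t' = t ∧ s' = s))]
    rw [PySem.List.pyGetD_eq_getElem _ _ ht0' (by omega)]

theorem pvSLoop (mc mp mf mb cal prot fats carbs pt ps : Int) (name : String) (T S : Int)
    (hnut : cal ≤ mc ∧ prot ≤ mp ∧ fats ≤ mf ∧ carbs ≤ mb)
    (hpt : 0 ≤ pt) (hps : 0 ≤ ps) (t : Int) (hptt : pt ≤ t) (htT : t ≤ T)
    (dp0 : List (List Int)) (sel0 : List (List (List String)))
    (n : Nat) :
    ∀ (shi : Int), shi - ps < n → shi ≤ S →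
    ∀ (dp : List (List Int)) (sel : List (List (List String))),
    Shape2 dp T S → Shape2 sel T S →
    (∀ t' s', 0 ≤ t' → t' ≤ T → 0 ≤ s' → s' ≤ S → (t' < t ∨ (t' = t ∧ s' ≤ shi)) →
      pvGetT 0 dp t' s' = pvGetT 0 dp0 t' s' ∧ pvGetT [] sel t' s' = pvGetT [] sel0 t' s') →
    (Shape2 ((PySem.List.pyRange shi (ps - 1) (-1)).foldl (fun st2 s =>
          if cal ≤ mc ∧ prot ≤ mp ∧ fats ≤ mf ∧ carbs ≤ mb then
            if pvGetT 0 st2.1 t s < pvGetT 0 st2.1 (t - pt) (s - ps) + cal then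
              (pvSetT st2.1 t s (pvGetT 0 st2.1 (t - pt) (s - ps) + cal),
               pvSetT st2.2 t s (pvGetT [] st2.2 (t - pt) (s - ps) ++ [name]))
            else st2
          else st2) (dp, sel)).1 T S) ∧
    (Shape2 ((PySem.List.pyRange shi (ps - 1) (-1)).foldl (fun st2 s =>
          if cal ≤ mc ∧ prot ≤ mp ∧ fats ≤ mf ∧ carbs ≤ mb then
            if pvGetT 0 st2.1 t s < pvGetT 0 st2.1 (t - pt) (s - ps) + cal then
              (pvSetT st2.1 t s (pvGetT 0 st2.1 (t - pt) (s - ps) + cal),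
               pvSetT st2.2 t s (pvGetT [] st2.2 (t - pt) (s - ps) ++ [name]))
            else st2
          else st2) (dp, sel)).2 T S) ∧
    (∀ t' s', 0 ≤ t' → t' ≤ T → 0 ≤ s' → s' ≤ S →
      (pvGetT 0 ((PySem.List.pyRange shi (ps - 1) (-1)).foldl (fun st2 s =>
          if cal ≤ mc ∧ prot ≤ mp ∧ fats ≤ mf ∧ carbs ≤ mb then
            if pvGetT 0 st2.1 t s < pvGetT 0 st2.1 (t - pt) (s - ps) + cal then
              (pvSetT st2.1 t s (pvGetT 0 st2.1 (t - pt) (s - ps) + cal),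
               pvSetT st2.2 t s (pvGetT [] st2.2 (t - pt) (s - ps) ++ [name]))
            else st2
          else st2) (dp, sel)).1 t' s',
       pvGetT [] ((PySem.List.pyRange shi (ps - 1) (-1)).foldl (fun st2 s =>
          if cal ≤ mc ∧ prot ≤ mp ∧ fats ≤ mf ∧ carbs ≤ mb then
            if pvGetT 0 st2.1 t s < pvGetT 0 st2.1 (t - pt) (s - ps) + cal then
              (pvSetT st2.1 t s (pvGetT 0 st2.1 (t - pt) (s - ps) + cal),
               pvSetT st2.2 t s (pvGetT [] st2.2 (t - pt) (s - ps) ++ [name]))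
            else st2
          else st2) (dp, sel)).2 t' s') =
        if t' = t ∧ ps ≤ s' ∧ s' ≤ shi then pvCell cal pt ps name dp0 sel0 t' s'
        else (pvGetT 0 dp t' s', pvGetT [] sel t' s')) := by
  induction n with
  | zero =>
    intro shi h0 _ dp sel hdp hsel _
    rw [PySem.List.pyRange_neg_one_eq_nil (by omega)]
    refine ⟨hdp, hsel, ?_⟩
    intro t' s' _ _ _ _
    rw [if_neg (by omega)]
    rfl
  | succ n ih =>
    intro shi hlt hS dp sel hdp hsel Hag
    by_cases hsh : shi ≤ ps - 1
    · rw [PySem.List.pyRange_neg_one_eq_nil (by omega)]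
      refine ⟨hdp, hsel, ?_⟩
      intro t' s' _ _ _ _
      rw [if_neg (by omega)]
      rfl
    · have hshge : ps ≤ shi := by omega
      have ht0 : 0 ≤ t := by omega
      have hshi0 : 0 ≤ shi := by omega
      rw [PySem.List.pyRange_neg_one_cons (by omega), List.foldl_cons]
      rw [if_pos hnut]
      -- agreement at the two read cells
      have hread1 := Hag t shi ht0 htT hshi0 hS (Or.inr ⟨rfl, le_refl _⟩)
      have hread2 := Hag (t - pt) (shi - ps) (by omega) (by omega) (by omega) (by omega) (by omega)
      -- the processed head state
      set mid := (if pvGetT 0 dp t shi < pvGetT 0 dp (t - pt) (shi - ps) + cal then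
              (pvSetT dp t shi (pvGetT 0 dp (t - pt) (shi - ps) + cal),
               pvSetT sel t shi (pvGetT [] sel (t - pt) (shi - ps) ++ [name]))
            else (dp, sel)) with hmid
    -- shapes of mid
      have hmdp : Shape2 mid.1 T S := by
        rw [hmid]; split
        · exact pvShape2_set _ hdp ht0 htT hshi0
        · exact hdp
      have hmsel : Shape2 mid.2 T S := by
        rw [hmid]; split
        · exact pvShape2_set _ hsel ht0 htT hshi0
        · exact hsel
      have hmidother : ∀ t' s', 0 ≤ t' → t' ≤ T → 0 ≤ s' → s' ≤ S → ¬(t' = t ∧ s' = shi) →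
          pvGetT 0 mid.1 t' s' = pvGetT 0 dp t' s' ∧ pvGetT [] mid.2 t' s' = pvGetT [] sel t' s' := by
        intro t' s' a b c e hne
        rw [hmid]; split
        · constructor
          · rw [pvGetT_setT 0 hdp ht0 htT hshi0 hS a b c e]; rw [if_neg hne]
          · rw [pvGetT_setT [] hsel ht0 htT hshi0 hS a b c e]; rw [if_neg hne]
        · exact ⟨rfl, rfl⟩
      have hmidcell : (pvGetT 0 mid.1 t shi, pvGetT [] mid.2 t shi) = pvCell cal pt ps name dp0 sel0 t shi := by
        rw [hmid]
        unfold pvCell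
        rw [hread1.1, hread2.1]
        split
        · rw [pvGetT_setT 0 hdp ht0 htT hshi0 hS ht0 htT hshi0 hS,
              pvGetT_setT [] hsel ht0 htT hshi0 hS ht0 htT hshi0 hS]
          rw [if_pos ⟨rfl, rfl⟩, if_pos ⟨rfl, rfl⟩, hread2.2]
        · exact Prod.ext (by simp [hread1.1]) (by simp [hread1.2])
      -- apply ih to mid with shi - 1
      have hagmid : ∀ t' s', 0 ≤ t' → t' ≤ T → 0 ≤ s' → s' ≤ S → (t' < t ∨ (t' = t ∧ s' ≤ shi - 1)) →
          pvGetT 0 mid.1 t' s' = pvGetT 0 dp0 t' s' ∧ pvGetT [] mid.2 t' s' = pvGetT [] sel0 t' s' := by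
        intro t' s' a b c e hreg
        have hne : ¬(t' = t ∧ s' = shi) := by omega
        have h1 := hmidother t' s' a b c e hne
        have h2 := Hag t' s' a b c e (by omega)
        exact ⟨h1.1.trans h2.1, h1.2.trans h2.2⟩
      obtain ⟨ih1, ih2, ih3⟩ := ih (shi - 1) (by omega) (by omega) mid.1 mid.2 hmdp hmsel hagmid
      refine ⟨ih1, ih2, ?_⟩
      intro t' s' a b c e
      have := ih3 t' s' a b c e
      rw [this]
      by_cases hcell : t' = t ∧ ps ≤ s' ∧ s' ≤ shi
      · rw [if_pos hcell]
        by_cases hprev : t' = t ∧ ps ≤ s' ∧ s' ≤ shi - 1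
        · rw [if_pos hprev]
        · have : t' = t ∧ s' = shi := by omega
          rw [if_neg hprev, this.1, this.2]
          exact hmidcell
      · rw [if_neg hcell, if_neg (by omega)]
        exact Prod.ext (hmidother t' s' a b c e (by omega)).1 (hmidother t' s' a b c e (by omega)).2

theorem pvTLoop (mc mp mf mb cal prot fats carbs pt ps : Int) (name : String) (T S : Int)
    (hnut : cal ≤ mc ∧ prot ≤ mp ∧ fats ≤ mf ∧ carbs ≤ mb)
    (hpt : 0 ≤ pt) (hps : 0 ≤ ps) (hS : 0 ≤ S)
    (dp0 : List (List Int)) (sel0 : List (List (List String)))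
    (n : Nat) :
    ∀ (thi : Int), thi - pt < n → thi ≤ T →
    ∀ (dp : List (List Int)) (sel : List (List (List String))),
    Shape2 dp T S → Shape2 sel T S →
    (∀ t' s', 0 ≤ t' → t' ≤ T → 0 ≤ s' → s' ≤ S → t' ≤ thi →
      pvGetT 0 dp t' s' = pvGetT 0 dp0 t' s' ∧ pvGetT [] sel t' s' = pvGetT [] sel0 t' s') →
    (Shape2 ((PySem.List.pyRange thi (pt - 1) (-1)).foldl (fun st1 t =>
        (PySem.List.pyRange S (ps - 1) (-1)).foldl (fun st2 s =>
          if cal ≤ mc ∧ prot ≤ mp ∧ fats ≤ mf ∧ carbs ≤ mb then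
            if pvGetT 0 st2.1 t s < pvGetT 0 st2.1 (t - pt) (s - ps) + cal then
              (pvSetT st2.1 t s (pvGetT 0 st2.1 (t - pt) (s - ps) + cal),
               pvSetT st2.2 t s (pvGetT [] st2.2 (t - pt) (s - ps) ++ [name]))
            else st2
          else st2) st1) (dp, sel)).1 T S) ∧
    (Shape2 ((PySem.List.pyRange thi (pt - 1) (-1)).foldl (fun st1 t =>
        (PySem.List.pyRange S (ps - 1) (-1)).foldl (fun st2 s =>
          if cal ≤ mc ∧ prot ≤ mp ∧ fats ≤ mf ∧ carbs ≤ mb then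
            if pvGetT 0 st2.1 t s < pvGetT 0 st2.1 (t - pt) (s - ps) + cal then
              (pvSetT st2.1 t s (pvGetT 0 st2.1 (t - pt) (s - ps) + cal),
               pvSetT st2.2 t s (pvGetT [] st2.2 (t - pt) (s - ps) ++ [name]))
            else st2
          else st2) st1) (dp, sel)).2 T S) ∧
    (∀ t' s', 0 ≤ t' → t' ≤ T → 0 ≤ s' → s' ≤ S →
      (pvGetT 0 ((PySem.List.pyRange thi (pt - 1) (-1)).foldl (fun st1 t =>
        (PySem.List.pyRange S (ps - 1) (-1)).foldl (fun st2 s =>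
          if cal ≤ mc ∧ prot ≤ mp ∧ fats ≤ mf ∧ carbs ≤ mb then
            if pvGetT 0 st2.1 t s < pvGetT 0 st2.1 (t - pt) (s - ps) + cal then
              (pvSetT st2.1 t s (pvGetT 0 st2.1 (t - pt) (s - ps) + cal),
               pvSetT st2.2 t s (pvGetT [] st2.2 (t - pt) (s - ps) ++ [name]))
            else st2
          else st2) st1) (dp, sel)).1 t' s',
       pvGetT [] ((PySem.List.pyRange thi (pt - 1) (-1)).foldl (fun st1 t =>
        (PySem.List.pyRange S (ps - 1) (-1)).foldl (fun st2 s =>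
          if cal ≤ mc ∧ prot ≤ mp ∧ fats ≤ mf ∧ carbs ≤ mb then
            if pvGetT 0 st2.1 t s < pvGetT 0 st2.1 (t - pt) (s - ps) + cal then
              (pvSetT st2.1 t s (pvGetT 0 st2.1 (t - pt) (s - ps) + cal),
               pvSetT st2.2 t s (pvGetT [] st2.2 (t - pt) (s - ps) ++ [name]))
            else st2
          else st2) st1) (dp, sel)).2 t' s') =
        if pt ≤ t' ∧ t' ≤ thi ∧ ps ≤ s' then pvCell cal pt ps name dp0 sel0 t' s'
        else (pvGetT 0 dp t' s', pvGetT [] sel t' s')) := by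
  induction n with
  | zero =>
    intro thi h0 _ dp sel hdp hsel _
    rw [show PySem.List.pyRange thi (pt - 1) (-1) = [] from PySem.List.pyRange_neg_one_eq_nil (by omega)]
    refine ⟨hdp, hsel, ?_⟩
    intro t' s' _ _ _ _
    rw [if_neg (by omega)]
    rfl
  | succ n ih =>
    intro thi hlt hT dp sel hdp hsel Hag
    by_cases hth : thi ≤ pt - 1
    · rw [show PySem.List.pyRange thi (pt - 1) (-1) = [] from PySem.List.pyRange_neg_one_eq_nil (by omega)]
      refine ⟨hdp, hsel, ?_⟩
      intro t' s' _ _ _ _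
      rw [if_neg (by omega)]
      rfl
    · have hptthi : pt ≤ thi := by omega
      have hthi0 : 0 ≤ thi := by omega
      rw [show PySem.List.pyRange thi (pt - 1) (-1) = thi :: PySem.List.pyRange (thi - 1) (pt - 1) (-1) from PySem.List.pyRange_neg_one_cons (by omega), List.foldl_cons]
      have hagS : ∀ t' s', 0 ≤ t' → t' ≤ T → 0 ≤ s' → s' ≤ S →
          (t' < thi ∨ (t' = thi ∧ s' ≤ S)) →
          pvGetT 0 dp t' s' = pvGetT 0 dp0 t' s' ∧ pvGetT [] sel t' s' = pvGetT [] sel0 t' s' := by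
        intro t' s' a b c e hreg
        exact Hag t' s' a b c e (by omega)
      obtain ⟨m1, m2, m3⟩ := pvSLoop mc mp mf mb cal prot fats carbs pt ps name T S hnut hpt hps
        thi hptthi hT dp0 sel0 ((S - ps).toNat + 1) S (by omega) le_rfl dp sel hdp hsel hagS
      have hagmid : ∀ t' s', 0 ≤ t' → t' ≤ T → 0 ≤ s' → s' ≤ S → t' ≤ thi - 1 →
          pvGetT 0 ((PySem.List.pyRange S (ps - 1) (-1)).foldl (fun st2 s =>
          if cal ≤ mc ∧ prot ≤ mp ∧ fats ≤ mf ∧ carbs ≤ mb then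
            if pvGetT 0 st2.1 thi s < pvGetT 0 st2.1 (thi - pt) (s - ps) + cal then
              (pvSetT st2.1 thi s (pvGetT 0 st2.1 (thi - pt) (s - ps) + cal),
               pvSetT st2.2 thi s (pvGetT [] st2.2 (thi - pt) (s - ps) ++ [name]))
            else st2
          else st2) (dp, sel)).1 t' s' = pvGetT 0 dp0 t' s' ∧
          pvGetT [] ((PySem.List.pyRange S (ps - 1) (-1)).foldl (fun st2 s =>
          if cal ≤ mc ∧ prot ≤ mp ∧ fats ≤ mf ∧ carbs ≤ mb then
            if pvGetT 0 st2.1 thi s < pvGetT 0 st2.1 (thi - pt) (s - ps) + cal then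
              (pvSetT st2.1 thi s (pvGetT 0 st2.1 (thi - pt) (s - ps) + cal),
               pvSetT st2.2 thi s (pvGetT [] st2.2 (thi - pt) (s - ps) ++ [name]))
            else st2
          else st2) (dp, sel)).2 t' s' = pvGetT [] sel0 t' s' := by
        intro t' s' a b c e hle
        have h := m3 t' s' a b c e
        rw [if_neg (by omega)] at h
        have h1 := congrArg Prod.fst h
        have h2 := congrArg Prod.snd h
        simp only at h1 h2
        have hg := Hag t' s' a b c e (by omega)
        exact ⟨h1.trans hg.1, h2.trans hg.2⟩
      obtain ⟨i1, i2, i3⟩ := ih (thi - 1) (by omega) (by omega) _ _ m1 m2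
        (fun t' s' a b c e hle => hagmid t' s' a b c e hle)
      refine ⟨i1, i2, ?_⟩
      intro t' s' a b c e
      refine Eq.trans (i3 t' s' a b c e) ?_
      by_cases hcell : pt ≤ t' ∧ t' ≤ thi ∧ ps ≤ s'
      · rw [if_pos hcell]
        by_cases hprev : pt ≤ t' ∧ t' ≤ thi - 1 ∧ ps ≤ s'
        · rw [if_pos hprev]
        · have hteq : t' = thi := by omega
          rw [if_neg hprev]
          have h := m3 t' s' a b c e
          rw [if_pos (by omega)] at h
          exact h
      · rw [if_neg hcell, if_neg (by omega)]
        have h := m3 t' s' a b c e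
        rw [if_neg (by omega)] at h
        exact h

theorem pvGetD_replicate {α : Type} (k : Nat) (i : Int) (d : α) :
    PySem.List.pyGetD (List.replicate k d) i d = d := by
  cases h : PySem.List.pyGet? (List.replicate k d) i with
  | none => exact PySem.List.pyGetD_of_none _ _ _ h
  | some x =>
    have hx := PySem.List.mem_of_pyGet?_eq_some _ h
    have hxd : x = d := List.eq_of_mem_replicate hx
    subst hxd
    simp [PySem.List.pyGetD, h]

theorem pvInitShape {α : Type} (x : α) (T S : Int) :
    Shape2 ((PySem.List.pyRange 0 (T + 1) 1).map (fun _ => List.replicate (S + 1).toNat x)) T S := by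
  constructor
  · simp [PySem.List.length_pyRange_one]
  · intro row hr
    obtain ⟨_, _, hrow⟩ := List.mem_map.mp hr
    simp [← hrow]

theorem pvInitGet {α : Type} (x : α) (T S t s : Int) (ht0 : 0 ≤ t) (htT : t ≤ T) :
    pvGetT x ((PySem.List.pyRange 0 (T + 1) 1).map (fun _ => List.replicate (S + 1).toNat x)) t s = x := by
  unfold pvGetT
  rw [PySem.List.pyGetD_map_pyRange_of_nonneg _ (T + 1) t _ ht0 (by omega)]
  exact pvGetD_replicate _ _ _

theorem pvMain (rs : List (Int × Int × Int × Int × String × Int × Int × String))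
    (mc mp mf mb : Int) (pref : String) (T S : Int) (hT : 0 ≤ T) (hS : 0 ≤ S)
    (hpre : ∀ r ∈ rs,
      (r.2.2.2.2.1 = pref ∧ r.1 ≤ mc ∧ r.2.1 ≤ mp ∧ r.2.2.1 ≤ mf ∧ r.2.2.2.1 ≤ mb) →
      0 ≤ r.2.2.2.2.2.1 ∧ 0 ≤ r.2.2.2.2.2.2.1) :
    ∀ (i : Nat), i ≤ rs.length →
    (Shape2 ((rs.take i).foldl (pvStepA mc mp mf mb pref T S)
        ((PySem.List.pyRange 0 (T + 1) 1).map (fun _ => List.replicate (S + 1).toNat (0 : Int)),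
         (PySem.List.pyRange 0 (T + 1) 1).map (fun _ => List.replicate (S + 1).toNat ([] : List String)))).1 T S) ∧
    (Shape2 ((rs.take i).foldl (pvStepA mc mp mf mb pref T S)
        ((PySem.List.pyRange 0 (T + 1) 1).map (fun _ => List.replicate (S + 1).toNat (0 : Int)),
         (PySem.List.pyRange 0 (T + 1) 1).map (fun _ => List.replicate (S + 1).toNat ([] : List String)))).2 T S) ∧
    (∀ t s, 0 ≤ t → t ≤ T → 0 ≤ s → s ≤ S →
      (pvGetT 0 ((rs.take i).foldl (pvStepA mc mp mf mb pref T S)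
        ((PySem.List.pyRange 0 (T + 1) 1).map (fun _ => List.replicate (S + 1).toNat (0 : Int)),
         (PySem.List.pyRange 0 (T + 1) 1).map (fun _ => List.replicate (S + 1).toNat ([] : List String)))).1 t s,
       pvGetT [] ((rs.take i).foldl (pvStepA mc mp mf mb pref T S)
        ((PySem.List.pyRange 0 (T + 1) 1).map (fun _ => List.replicate (S + 1).toNat (0 : Int)),
         (PySem.List.pyRange 0 (T + 1) 1).map (fun _ => List.replicate (S + 1).toNat ([] : List String)))).2 t s) =
      pvBest rs mc mp mf mb pref i t s) := by
  intro i
  induction i with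
  | zero =>
    intro _
    simp only [List.take_zero, List.foldl_nil]
    refine ⟨pvInitShape 0 T S, pvInitShape [] T S, ?_⟩
    intro t s ht0 htT hs0 hsS
    rw [pvInitGet 0 T S t s ht0 htT, pvInitGet [] T S t s ht0 htT]
    rfl
  | succ i ih =>
    intro hlen
    have hilt : i < rs.length := by omega
    obtain ⟨s1, s2, s3⟩ := ih (by omega)
    rw [List.take_succ, List.getElem?_eq_getElem hilt]
    simp only [Option.toList_some, List.foldl_append, List.foldl_cons, List.foldl_nil]
    rcases hre : rs[i]'hilt with ⟨cal, prot, fats, carbs, dpref, pt, ps, name⟩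
    have hmem : (cal, prot, fats, carbs, dpref, pt, ps, name) ∈ rs := by
      rw [← hre]; exact List.getElem_mem hilt
    have hpre' := hpre _ hmem
    simp only [pvStepA]
    have hbest : pvBest rs mc mp mf mb pref (i + 1) = fun t s =>
        let res := pvBest rs mc mp mf mb pref i t s
        if dpref = pref ∧ cal ≤ mc ∧ prot ≤ mp ∧ fats ≤ mf ∧ carbs ≤ mb ∧ pt ≤ t ∧ ps ≤ s then
          let inc := pvBest rs mc mp mf mb pref i (t - pt) (s - ps)
          if res.1 < inc.1 + cal then (inc.1 + cal, inc.2 ++ [name]) else res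
        else res := by
      funext t s
      simp only [pvBest, PySem.List.pyGet?_natCast, List.getElem?_eq_getElem hilt, hre]
    rw [hbest]
    by_cases hpref : dpref = pref
    · rw [if_neg (by simp [hpref])]
      by_cases hnut : cal ≤ mc ∧ prot ≤ mp ∧ fats ≤ mf ∧ carbs ≤ mb
      · have hpp := hpre' ⟨hpref, hnut.1, hnut.2.1, hnut.2.2.1, hnut.2.2.2⟩
        have hpt : (0:Int) ≤ pt := hpp.1
        have hps : (0:Int) ≤ ps := hpp.2
        obtain ⟨p1, p2, p3⟩ := pvTLoop mc mp mf mb cal prot fats carbs pt ps name T S hnut hpt hps hS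
          ((rs.take i).foldl (pvStepA mc mp mf mb pref T S)
            ((PySem.List.pyRange 0 (T + 1) 1).map (fun _ => List.replicate (S + 1).toNat (0 : Int)),
             (PySem.List.pyRange 0 (T + 1) 1).map (fun _ => List.replicate (S + 1).toNat ([] : List String)))).1
          ((rs.take i).foldl (pvStepA mc mp mf mb pref T S)
            ((PySem.List.pyRange 0 (T + 1) 1).map (fun _ => List.replicate (S + 1).toNat (0 : Int)),
             (PySem.List.pyRange 0 (T + 1) 1).map (fun _ => List.replicate (S + 1).toNat ([] : List String)))).2
          ((T - pt).toNat + 1) T (by omega) le_rfl _ _ s1 s2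
          (fun t' s' a b c e _ => ⟨rfl, rfl⟩)
        refine ⟨p1, p2, ?_⟩
        intro t s ht0 htT hs0 hsS
        refine Eq.trans (p3 t s ht0 htT hs0 hsS) ?_
        beta_reduce
        have h1 := s3 t s ht0 htT hs0 hsS
        by_cases hfit : pt ≤ t ∧ ps ≤ s
        · have h2 := s3 (t - pt) (s - ps) (by omega) (by omega) (by omega) (by omega)
          have h1a := congrArg Prod.fst h1
          have h1b := congrArg Prod.snd h1
          have h2a := congrArg Prod.fst h2
          have h2b := congrArg Prod.snd h2
          dsimp only at h1a h1b h2a h2b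
          rw [if_pos ⟨hfit.1, htT, hfit.2⟩]
          rw [if_pos (⟨hpref, hnut.1, hnut.2.1, hnut.2.2.1, hnut.2.2.2, hfit.1, hfit.2⟩ :
            dpref = pref ∧ cal ≤ mc ∧ prot ≤ mp ∧ fats ≤ mf ∧ carbs ≤ mb ∧ pt ≤ t ∧ ps ≤ s)]
          unfold pvCell
          rw [h1a, h1b, h2a, h2b]
        · rw [if_neg (by omega : ¬(pt ≤ t ∧ t ≤ T ∧ ps ≤ s))]
          simp only [if_neg (fun hc => hfit ⟨hc.2.2.2.2.2.1, hc.2.2.2.2.2.2⟩ :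
            ¬(dpref = pref ∧ cal ≤ mc ∧ prot ≤ mp ∧ fats ≤ mf ∧ carbs ≤ mb ∧ pt ≤ t ∧ ps ≤ s))]
          exact h1
      · simp only [if_neg hnut, List.foldl_fixed]
        refine ⟨s1, s2, ?_⟩
        intro t s ht0 htT hs0 hsS
        simp only [if_neg (fun hc => hnut ⟨hc.2.1, hc.2.2.1, hc.2.2.2.1, hc.2.2.2.2.1⟩ :
          ¬(dpref = pref ∧ cal ≤ mc ∧ prot ≤ mp ∧ fats ≤ mf ∧ carbs ≤ mb ∧ pt ≤ t ∧ ps ≤ s))]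
        exact s3 t s ht0 htT hs0 hsS
    · rw [if_pos hpref]
      refine ⟨s1, s2, ?_⟩
      intro t s ht0 htT hs0 hsS
      simp only [if_neg (fun hc => hpref hc.1 :
        ¬(dpref = pref ∧ cal ≤ mc ∧ prot ≤ mp ∧ fats ≤ mf ∧ carbs ≤ mb ∧ pt ≤ t ∧ ps ≤ s))]
      exact s3 t s ht0 htT hs0 hsS

-- ===== VERDICT (by name: the statement is the Claim_ definition above) =====
theorem knapsack_recipes_spec : Claim_equal_knapsack_recipes := by
  intro recipes mc mp mf mb pref T S _hdom hpre
  obtain ⟨hT, hS, hrec⟩ := hpre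
  have h := pvMain recipes mc mp mf mb pref T S hT hS hrec recipes.length le_rfl
  obtain ⟨-, -, h3⟩ := h
  have := h3 T S hT le_rfl hS le_rfl
  simp only [List.take_length] at this
  unfold Spec_knapsack_recipes knapsack_recipes knapsack_recipes_alt
  have h2 := congrArg Prod.snd this
  exact h2
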